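-- pv_equiv track=rewrite | github.com/pypi-data/pypi-mirror-339 | packages/fw-curate-bids/fw_curate_bids-2.2.14-py3-none-any.whl/fw_curate_bids/BIDSCuration.py | get_most_subjects_count
-- ===== SOURCE A (Python) =====
-- def get_most_subjects_count(acquisition_labels, subjects_have):
--     """For each acquisition label find the number of times it appears across subjects.
--
--     This produces a histogram of the number of times an acquisition appears across subjects.  It is used to
--     calculate self.most_subjects_have, which is the number of times an acquisition appears for most subjects.
--
--     There has to be a better way of doing this.
--
--     Args:
--         acquisition_labels (dict) # acquisition_labels[acquisition.label] = count over entire project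
--         subjects_have (dict) subjects_have[subject.label][acquisition.label] = count
--     Returns:
--         most_subjects_have_count (dict) most_subjects_have_count[acquisition.label][count] a count histogram
--     """
--
--     most_subjects_have_count = dict()
--
--     # and all acquisition labels found in any subject
--     for acq_label in acquisition_labels:
--         # create the "histogram"
--         if acq_label not in most_subjects_have_count:
--             most_subjects_have_count[acq_label] = dict()
--
--         # go through all subjects
--         for subj_label in subjects_have:
--             if acq_label in subjects_have[subj_label]:
--                 # the number of times an acquisition label appears for each subject
--                 count = subjects_have[subj_label][acq_label]
--
--                 if count in most_subjects_have_count[acq_label]: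
--                     most_subjects_have_count[acq_label][count] += 1
--                 else:
--                     most_subjects_have_count[acq_label][count] = 1
--
--             else:  # label not seen for subject so count # of times it was missing
--                 if 0 in most_subjects_have_count[acq_label]:
--                     most_subjects_have_count[acq_label][0] += 1
--                 else:
--                     most_subjects_have_count[acq_label][0] = 1
--
--     return most_subjects_have_count
-- ===== SOURCE B (Python) =====
-- def count_histogram(values):
--     hist = {}
--     for v in values:
--         hist[v] = hist.get(v, 0) + 1
--     return hist
--
--
-- def get_most_subjects_count(acquisition_labels, subjects_have):
--     """Scatter each subject's counts into a dense per-label vector of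
--     per-subject counts (0 where absent), then histogram each vector."""
--     num_subjects = len(subjects_have)
--     values = {acq: [0] * num_subjects for acq in acquisition_labels}
--     for i, counts in enumerate(subjects_have.values()):
--         for acq, count in counts.items():
--             if acq in values:
--                 values[acq][i] = count
--     return {acq: count_histogram(vals) for acq, vals in values.items()}
-- ===== Notes on version B (the rewrite author's own statement) =====
-- stated objective: faster
-- what changed: Instead of scanning every subject once per acquisition label with per-pair dict membership tests and branching (present vs absent), B scatters each subject's counts in one pass into a dense per-label vector of per-subject counts (0 where absent) and then histograms each vector; Pre_ excludes association lists with duplicate acquisition labels or duplicate keys within a subject's count map, which do not represent Python dicts.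
import Mathlib
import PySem

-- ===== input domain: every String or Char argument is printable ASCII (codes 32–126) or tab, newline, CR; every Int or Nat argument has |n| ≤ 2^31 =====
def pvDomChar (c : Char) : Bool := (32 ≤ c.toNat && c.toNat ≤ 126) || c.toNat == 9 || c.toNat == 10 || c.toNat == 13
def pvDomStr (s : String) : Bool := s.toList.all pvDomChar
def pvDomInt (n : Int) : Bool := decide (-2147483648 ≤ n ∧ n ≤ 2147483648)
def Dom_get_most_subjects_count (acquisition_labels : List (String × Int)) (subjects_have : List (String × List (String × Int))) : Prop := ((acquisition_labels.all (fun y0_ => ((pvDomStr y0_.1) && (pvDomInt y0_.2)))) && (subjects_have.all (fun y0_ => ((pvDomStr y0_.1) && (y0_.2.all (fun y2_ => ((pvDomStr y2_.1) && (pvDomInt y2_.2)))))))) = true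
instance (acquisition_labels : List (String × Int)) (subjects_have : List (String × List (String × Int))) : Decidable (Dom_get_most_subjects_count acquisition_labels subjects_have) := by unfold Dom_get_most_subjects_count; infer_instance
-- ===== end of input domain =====

-- B scatters each subject's counts into a dense per-label vector and histograms each
-- vector, instead of scanning every subject once per label; return values proved equal
-- on dict-shaped inputs (unique keys).

-- ===== PORT A =====
def get_most_subjects_count (acquisition_labels : List (String × Int)) (subjects_have : List (String × List (String × Int))) : List (String × List (Int × Int)) :=
  let m : PySem.Dict String (PySem.Dict Int Int) :=
    acquisition_labels.foldl (fun m p =>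
      let acq := p.1
      let m := if m.contains acq then m else m.insert acq PySem.Dict.empty
      subjects_have.foldl (fun m q =>
        let inner : PySem.Dict String Int := PySem.Dict.mk q.2
        m.modify acq PySem.Dict.empty (fun h =>
          if inner.contains acq then
            let count := inner.getD acq 0
            if h.contains count then h.modify count 0 (· + 1) else h.insert count 1
          else
            if h.contains 0 then h.modify 0 0 (· + 1) else h.insert 0 1)) m)
      PySem.Dict.empty
  m.items.map (fun r => (r.1, r.2.items))

-- ===== PORT B =====
-- helper of Source B: histogram of a list of values
def count_histogram (values : List Int) : PySem.Dict Int Int :=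
  values.foldl (fun hist v => hist.insert v (hist.getD v 0 + 1)) PySem.Dict.empty

def get_most_subjects_count_alt (acquisition_labels : List (String × Int)) (subjects_have : List (String × List (String × Int))) : List (String × List (Int × Int)) :=
  let num_subjects := subjects_have.length
  let values : PySem.Dict String (List Int) :=
    acquisition_labels.foldl (fun d p => d.insert p.1 (List.replicate num_subjects (0 : Int))) PySem.Dict.empty
  -- values[acq][i] = count: pySetD is exact here, the enumerate index is always in range of the stored vector
  let values := (PySem.List.enumerate subjects_have).foldl (fun v iq =>
      iq.2.2.foldl (fun v r =>
        if v.contains r.1 then v.modify r.1 [] (fun l => PySem.List.pySetD l iq.1 r.2) else v) v) values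
  values.items.map (fun p => (p.1, (count_histogram p.2).items))

-- ===== PRECONDITION & SPEC =====
-- Pre_ excludes association lists with duplicate keys among the acquisition labels or
-- inside a subject's count map: those do not represent Python dicts (whose keys are
-- unique), so A's behaviour there is not defined by the Python source.
def Pre_get_most_subjects_count (acquisition_labels : List (String × Int)) (subjects_have : List (String × List (String × Int))) : Prop :=
  (acquisition_labels.map Prod.fst).Nodup ∧ ∀ q ∈ subjects_have, (q.2.map Prod.fst).Nodup
instance (acquisition_labels : List (String × Int)) (subjects_have : List (String × List (String × Int))) : Decidable (Pre_get_most_subjects_count acquisition_labels subjects_have) := by unfold Pre_get_most_subjects_count; infer_instance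

def pvWitness_get_most_subjects_count : (List (String × Int)) × (List (String × List (String × Int))) :=
  ([("acq-a", 2), ("acq-b", 1)], [("s1", [("acq-a", 2)]), ("s2", [("acq-a", 1), ("acq-b", 1)])])

def Spec_get_most_subjects_count (acquisition_labels : List (String × Int)) (subjects_have : List (String × List (String × Int))) (out : List (String × List (Int × Int))) : Prop := out = get_most_subjects_count_alt acquisition_labels subjects_have
instance (acquisition_labels : List (String × Int)) (subjects_have : List (String × List (String × Int))) (out : List (String × List (Int × Int))) : Decidable (Spec_get_most_subjects_count acquisition_labels subjects_have out) := by unfold Spec_get_most_subjects_count; infer_instance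

-- ===== CLAIM (what is proved, stated in full; the proofs are below) =====
def Claim_equal_get_most_subjects_count : Prop := ∀ (acquisition_labels : List (String × Int)) (subjects_have : List (String × List (String × Int))), Dom_get_most_subjects_count acquisition_labels subjects_have → Pre_get_most_subjects_count acquisition_labels subjects_have → Spec_get_most_subjects_count acquisition_labels subjects_have (get_most_subjects_count acquisition_labels subjects_have)

-- ===== LEMMAS AND PROOFS =====

-- the per-subject value A tallies for a label: the subject's count, or 0 if absent
def pvVal (acq : String) (q : String × List (String × Int)) : Int :=
  if (PySem.Dict.mk q.2 : PySem.Dict String Int).contains acq then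
    (PySem.Dict.mk q.2 : PySem.Dict String Int).getD acq 0
  else 0

def pvVs (subjects_have : List (String × List (String × Int))) (acq : String) : List Int :=
  subjects_have.map (pvVal acq)

-- ---- A side ----
lemma pvInnerBranch (acq : String) (q : String × List (String × Int)) (h : PySem.Dict Int Int) :
    (if (PySem.Dict.mk q.2 : PySem.Dict String Int).contains acq then
        let count := (PySem.Dict.mk q.2 : PySem.Dict String Int).getD acq 0
        if h.contains count then h.modify count 0 (· + 1) else h.insert count 1
      else
        if h.contains 0 then h.modify 0 0 (· + 1) else h.insert 0 1)
    = h.insert (pvVal acq q) (h.getD (pvVal acq q) 0 + 1) := by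
  unfold pvVal
  split_ifs <;>
    simp_all [PySem.Dict.modify, PySem.Dict.getD_of_not_contains]

lemma pvInnerCollapse (sh : List (String × List (String × Int))) (acq : String)
    (m : PySem.Dict String (PySem.Dict Int Int)) (h : PySem.Dict Int Int) :
    sh.foldl (fun m q =>
      m.modify acq PySem.Dict.empty (fun h =>
        if (PySem.Dict.mk q.2 : PySem.Dict String Int).contains acq then
          let count := (PySem.Dict.mk q.2 : PySem.Dict String Int).getD acq 0
          if h.contains count then h.modify count 0 (· + 1) else h.insert count 1
        else
          if h.contains 0 then h.modify 0 0 (· + 1) else h.insert 0 1)) (m.insert acq h)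
    = m.insert acq (sh.foldl (fun h q => h.insert (pvVal acq q) (h.getD (pvVal acq q) 0 + 1)) h) := by
  induction sh generalizing h with
  | nil => simp
  | cons q rest ih =>
      simp only [List.foldl_cons]
      rw [show ((m.insert acq h).modify acq PySem.Dict.empty _) =
        m.insert acq (h.insert (pvVal acq q) (h.getD (pvVal acq q) 0 + 1)) from ?_]
      · exact ih _
      · rw [PySem.Dict.modify, PySem.Dict.getD_insert_self, PySem.Dict.insert_insert_self,
          pvInnerBranch]

lemma pvCounterVs (sh : List (String × List (String × Int))) (acq : String) :
    sh.foldl (fun h q => h.insert (pvVal acq q) (h.getD (pvVal acq q) 0 + 1)) PySem.Dict.empty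
    = PySem.Dict.counter (pvVs sh acq) := by
  rw [← PySem.Dict.foldl_insert_getD_add_one_eq_counter, pvVs, List.foldl_map]

lemma pvAOuter (sh : List (String × List (String × Int))) (als : List (String × Int))
    (m : PySem.Dict String (PySem.Dict Int Int))
    (hnd : (als.map Prod.fst).Nodup) (hfresh : ∀ p ∈ als, m.contains p.1 = false) :
    (als.foldl (fun m p =>
      let acq := p.1
      let m := if m.contains acq then m else m.insert acq PySem.Dict.empty
      sh.foldl (fun m q =>
        let inner : PySem.Dict String Int := PySem.Dict.mk q.2
        m.modify acq PySem.Dict.empty (fun h =>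
          if inner.contains acq then
            let count := inner.getD acq 0
            if h.contains count then h.modify count 0 (· + 1) else h.insert count 1
          else
            if h.contains 0 then h.modify 0 0 (· + 1) else h.insert 0 1)) m) m).items
    = m.items ++ als.map (fun p => (p.1, PySem.Dict.counter (pvVs sh p.1))) := by
  induction als generalizing m with
  | nil => simp
  | cons p rest ih =>
      rw [List.map_cons] at hnd
      have hcons := List.nodup_cons.mp hnd
      have hc : m.contains p.1 = false := hfresh p (List.mem_cons_self ..)
      simp only [List.foldl_cons, List.map_cons, hc, Bool.false_eq_true, if_false]
      rw [pvInnerCollapse, pvCounterVs]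
      rw [ih _ hcons.2
        (fun p' hp' => by
          rw [PySem.Dict.contains_insert]
          have hne : p'.1 ≠ p.1 := by
            intro he
            exact hcons.1 (he ▸ List.mem_map_of_mem hp')
          simp [hne, hfresh p' (List.mem_cons_of_mem _ hp')])]
      rw [PySem.Dict.items_insert_of_not_contains _ _ hc, List.append_assoc]
      rfl

-- ---- B side ----

-- the effect of one subject's scatter pass on the vector stored under acq
def pvWr (i : Int) (rs : List (String × Int)) (acq : String) (l : List Int) : List Int :=
  rs.foldl (fun l r => if r.1 = acq then PySem.List.pySetD l i r.2 else l) l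

-- the effect of the whole scatter loop on the vector stored under acq
def pvWrL (L : List (Int × (String × List (String × Int)))) (acq : String) (l : List Int) : List Int :=
  L.foldl (fun l iq => pvWr iq.1 iq.2.2 acq l) l

-- the scatter loop never changes which keys a dict has
lemma pvScatKeys1 (rs : List (String × Int)) (i : Int) :
    ∀ (v : PySem.Dict String (List Int)),
    (rs.foldl (fun v r =>
      if v.contains r.1 then v.modify r.1 [] (fun l => PySem.List.pySetD l i r.2) else v) v).keys
    = v.keys := by
  induction rs with
  | nil => intro v; rfl
  | cons r rest ih =>
      intro v
      rw [List.foldl_cons]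
      by_cases hc : v.contains r.1
      · rw [if_pos hc, ih]
        simp [PySem.Dict.modify, PySem.Dict.keys_insert_of_contains, hc]
      · rw [if_neg hc, ih]

lemma pvScatKeys (L : List (Int × (String × List (String × Int)))) :
    ∀ (v : PySem.Dict String (List Int)),
    (L.foldl (fun v iq =>
      iq.2.2.foldl (fun v r =>
        if v.contains r.1 then v.modify r.1 [] (fun l => PySem.List.pySetD l iq.1 r.2) else v) v) v).keys
    = v.keys := by
  induction L with
  | nil => intro v; rfl
  | cons iq rest ih => intro v; rw [List.foldl_cons, ih, pvScatKeys1]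

lemma pvScatContains1 (rs : List (String × Int)) (i : Int)
    (v : PySem.Dict String (List Int)) (k : String) :
    (rs.foldl (fun v r =>
      if v.contains r.1 then v.modify r.1 [] (fun l => PySem.List.pySetD l i r.2) else v) v).contains k
    = v.contains k := by
  rw [PySem.Dict.contains_eq_decide_mem_keys, PySem.Dict.contains_eq_decide_mem_keys, pvScatKeys1]

-- one subject's scatter pass, seen through the vector stored under acq
lemma pvScatGetD1 (rs : List (String × Int)) (i : Int) (acq : String) :
    ∀ (v : PySem.Dict String (List Int)), v.contains acq = true →
    (rs.foldl (fun v r =>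
      if v.contains r.1 then v.modify r.1 [] (fun l => PySem.List.pySetD l i r.2) else v) v).getD acq []
    = pvWr i rs acq (v.getD acq []) := by
  induction rs with
  | nil => intro v _; rfl
  | cons r rest ih =>
      intro v hv
      rw [List.foldl_cons, pvWr, List.foldl_cons, ← pvWr]
      by_cases hc : v.contains r.1
      · rw [if_pos hc]
        by_cases he : r.1 = acq
        · subst he
          rw [ih _ (by rw [PySem.Dict.contains_modify]; simp),
            PySem.Dict.getD_modify_self, if_pos rfl]
        · rw [ih _ (by rw [PySem.Dict.contains_modify]; simp [hv]),
            PySem.Dict.getD_modify, if_neg (fun h => he h.symm), if_neg he]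
      · have hne : r.1 ≠ acq := fun h => by rw [h, hv] at hc; exact hc rfl
        rw [if_neg hc, if_neg hne, ih _ hv]

-- the whole scatter loop, seen through the vector stored under acq
lemma pvScatGetD (L : List (Int × (String × List (String × Int)))) (acq : String) :
    ∀ (v : PySem.Dict String (List Int)), v.contains acq = true →
    (L.foldl (fun v iq =>
      iq.2.2.foldl (fun v r =>
        if v.contains r.1 then v.modify r.1 [] (fun l => PySem.List.pySetD l iq.1 r.2) else v) v) v).getD acq []
    = pvWrL L acq (v.getD acq []) := by
  induction L with
  | nil => intro v _; rfl
  | cons iq rest ih =>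
      intro v hv
      rw [List.foldl_cons, pvWrL, List.foldl_cons, ← pvWrL,
        ih _ (by rw [pvScatContains1]; exact hv), pvScatGetD1 _ _ _ _ hv]

-- the initial dense dict: every listed label maps to the zero vector
lemma pvInitGetD (als : List (String × Int)) (c : List Int) (k : String) :
    ∀ (d : PySem.Dict String (List Int)),
    (als.foldl (fun d p => d.insert p.1 c) d).getD k []
    = if k ∈ als.map Prod.fst then c else d.getD k [] := by
  induction als with
  | nil => intro d; simp
  | cons p rest ih =>
      intro d
      rw [List.foldl_cons, ih, List.map_cons]
      by_cases hm : k ∈ rest.map Prod.fst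
      · simp [hm]
      · simp [hm, PySem.Dict.getD_insert]

-- a fold that keeps the last matching value, when at most one entry matches
lemma pvPickNone (rs : List (String × Int)) (acq : String) (x : Int)
    (h : ∀ r ∈ rs, r.1 ≠ acq) :
    rs.foldl (fun x r => if r.1 = acq then r.2 else x) x = x := by
  induction rs with
  | nil => rfl
  | cons r rest ih =>
      rw [List.foldl_cons, if_neg (h r (List.mem_cons_self ..))]
      exact ih (fun r' hr' => h r' (List.mem_cons_of_mem _ hr'))

lemma pvPick (rs : List (String × Int)) (acq : String)
    (hnd : (rs.map Prod.fst).Nodup) :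
    rs.foldl (fun x r => if r.1 = acq then r.2 else x) 0
    = (if (PySem.Dict.mk rs : PySem.Dict String Int).contains acq then
        (PySem.Dict.mk rs : PySem.Dict String Int).getD acq 0 else 0) := by
  induction rs with
  | nil => simp
  | cons r rest ih =>
      rw [List.map_cons] at hnd
      have hcons := List.nodup_cons.mp hnd
      rw [List.foldl_cons]
      by_cases he : r.1 = acq
      · have hno : ∀ r' ∈ rest, r'.1 ≠ acq := fun r' hr' h' =>
          hcons.1 (by rw [he, ← h']; exact List.mem_map_of_mem hr')
        rw [if_pos he, pvPickNone _ _ _ hno]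
        have hc : (PySem.Dict.mk (r :: rest) : PySem.Dict String Int).contains acq = true := by
          simp [PySem.Dict.contains, he]
        rw [hc, if_pos rfl, PySem.Dict.getD_eq_get?_getD, PySem.Dict.get?_mk_cons]
        simp [he]
      · have hc : (PySem.Dict.mk (r :: rest) : PySem.Dict String Int).contains acq
            = (PySem.Dict.mk rest : PySem.Dict String Int).contains acq := by
          simp [PySem.Dict.contains, he]
        have hg : (PySem.Dict.mk (r :: rest) : PySem.Dict String Int).getD acq 0
            = (PySem.Dict.mk rest : PySem.Dict String Int).getD acq 0 := by
          rw [PySem.Dict.getD_eq_get?_getD, PySem.Dict.get?_mk_cons,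
            PySem.Dict.getD_eq_get?_getD]
          simp [he]
        rw [if_neg he, hc, hg, ih hcons.2]

-- one subject's pass on pref ++ x :: tail rewrites exactly the slot after pref
lemma pvWrMid (rs : List (String × Int)) (acq : String) :
    ∀ (pref tail : List Int) (x : Int),
    pvWr (pref.length : Int) rs acq (pref ++ x :: tail)
    = pref ++ (rs.foldl (fun x r => if r.1 = acq then r.2 else x) x) :: tail := by
  induction rs with
  | nil => intro pref tail x; rfl
  | cons r rest ih =>
      intro pref tail x
      rw [pvWr, List.foldl_cons, ← pvWr, List.foldl_cons]
      by_cases he : r.1 = acq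
      · rw [if_pos he, if_pos he, PySem.List.pySetD_natCast,
          show (pref ++ x :: tail).set pref.length r.2 = pref ++ r.2 :: tail from by
            rw [List.set_append_right _ _ (le_refl _)]
            simp, ih]
      · rw [if_neg he, if_neg he, ih]

-- the whole scatter, starting after a finished prefix, produces the per-subject values
lemma pvCore (sh : List (String × List (String × Int))) (acq : String)
    (hnd : ∀ q ∈ sh, (q.2.map Prod.fst).Nodup) :
    ∀ (pref : List Int),
    pvWrL (PySem.List.enumerate sh (pref.length : Int)) acq
      (pref ++ List.replicate sh.length (0 : Int))
    = pref ++ pvVs sh acq := by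
  induction sh with
  | nil => intro pref; simp [PySem.List.enumerate_nil, pvWrL, pvVs]
  | cons q rest ih =>
      intro pref
      rw [PySem.List.enumerate_cons, pvWrL, List.foldl_cons, ← pvWrL,
        List.length_cons, List.replicate_succ, pvWrMid,
        pvPick _ _ (hnd q (List.mem_cons_self ..))]
      have h1 : pref ++ (if (PySem.Dict.mk q.2 : PySem.Dict String Int).contains acq then
            (PySem.Dict.mk q.2 : PySem.Dict String Int).getD acq 0 else 0) :: List.replicate rest.length 0
          = (pref ++ [pvVal acq q]) ++ List.replicate rest.length 0 := by
        rw [pvVal, List.append_assoc]; rfl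
      rw [h1,
        show ((pref.length : Int) + 1) = (((pref ++ [pvVal acq q]).length : Nat) : Int) from by
          simp,
        ih (fun q' hq' => hnd q' (List.mem_cons_of_mem _ hq')) (pref ++ [pvVal acq q])]
      simp [pvVs]

-- B's result, per label
lemma pvBResult (als : List (String × Int)) (sh : List (String × List (String × Int)))
    (hnd : (als.map Prod.fst).Nodup) (hin : ∀ q ∈ sh, (q.2.map Prod.fst).Nodup) :
    get_most_subjects_count_alt als sh
    = als.map (fun p => (p.1, (PySem.Dict.counter (pvVs sh p.1)).items)) := by
  simp only [get_most_subjects_count_alt]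
  set v0 : PySem.Dict String (List Int) :=
    als.foldl (fun d p => d.insert p.1 (List.replicate sh.length (0 : Int))) PySem.Dict.empty with hv0
  set vf : PySem.Dict String (List Int) :=
    (PySem.List.enumerate sh).foldl (fun v iq =>
      iq.2.2.foldl (fun v r =>
        if v.contains r.1 then v.modify r.1 [] (fun l => PySem.List.pySetD l iq.1 r.2) else v) v) v0 with hvf
  have hk0 : v0.keys = als.map Prod.fst := by
    rw [hv0, PySem.Dict.keys_foldl_insert_key als Prod.fst, PySem.Dict.keys_empty,
      PySem.Set.update_nil_left, PySem.Set.ofList_eq_self_of_nodup _ hnd]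
  have hkf : vf.keys = als.map Prod.fst := by rw [hvf, pvScatKeys, hk0]
  have hnodk : vf.keys.Nodup := by rw [hkf]; exact hnd
  rw [PySem.Dict.items_eq_map_keys vf hnodk [], hkf, List.map_map, List.map_map]
  refine List.map_congr_left (fun p hp => ?_)
  have hmem : p.1 ∈ als.map Prod.fst := List.mem_map_of_mem hp
  have hc0 : v0.contains p.1 = true := by
    rw [PySem.Dict.contains_eq_decide_mem_keys, hk0]; simpa using hmem
  have hg0 : v0.getD p.1 [] = List.replicate sh.length (0 : Int) := by
    rw [hv0, pvInitGetD, if_pos hmem]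
  have hgf : vf.getD p.1 [] = pvVs sh p.1 := by
    rw [hvf, pvScatGetD _ _ _ hc0, hg0,
      show ((0 : Int)) = ((([] : List Int).length : Nat) : Int) from by simp]
    have := pvCore sh p.1 hin ([] : List Int)
    simpa using this
  have hch : count_histogram (pvVs sh p.1) = PySem.Dict.counter (pvVs sh p.1) := by
    rw [count_histogram, PySem.Dict.foldl_insert_getD_add_one_eq_counter]
  simp only [Function.comp_apply, hgf, hch]

-- ===== VERDICT (by name: the statement is the Claim_ definition above) =====
theorem get_most_subjects_count_spec : Claim_equal_get_most_subjects_count := by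
  intro als sh _ hpre
  unfold Spec_get_most_subjects_count
  rw [pvBResult als sh hpre.1 hpre.2]
  simp only [get_most_subjects_count]
  rw [pvAOuter sh als PySem.Dict.empty hpre.1 (fun p _ => by simp)]
  rw [show (PySem.Dict.empty : PySem.Dict String (PySem.Dict Int Int)).items = [] from rfl]
  simp [List.map_map, Function.comp_def]
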